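-- pv_equiv track=rewrite | github.com/argolab/dyna-R | dyna/builtins.py | infer_modes
-- ===== SOURCE A (Python) =====
-- def infer_modes(d):
--     # determine other modes that we can support
--     # so if something supports the free mode, then it will also support the ground mode,
--     # this will automatically infer those cases
--     done = False
--     while not done:
--         done = True
--         for k in list(d.keys()):
--             for i, v in enumerate(k):
--                 if v is False:  # meaning it supports the free mode
--                     nk = k[:i] + (True,) + k[i+1:]
--                     if nk not in d:
--                         done = False
--                         d[nk] = d[k]
--     return d
-- ===== SOURCE B (Python) =====
-- def infer_modes(d):
--     # BFS worklist with per-key batch generation: pop a key, build its missing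
--     # one-flip supersets in index order as a batch, insert the batch, enqueue it.
--     queue = list(d.keys())
--     while queue:
--         k = queue.pop(0)
--         v = d[k]
--         cand = [tuple(True if j == i else k[j] for j in range(len(k)))
--                 for i in range(len(k)) if not k[i]]
--         fresh = [nk for nk in cand if nk not in d]
--         for nk in fresh:
--             d[nk] = v
--         queue.extend(fresh)
--     return d
-- ===== Notes on version B (the rewrite author's own statement) =====
-- stated objective: alternative
-- what changed: The repeated full-rescan fixpoint (while-not-done passes with a per-insertion done flag over list(d.keys())) is replaced by a single BFS worklist pass that pops each key once and generates its missing one-flip supersets as a batch (comprehensions over range(len(k))) before inserting and enqueueing them, so the done flag and the rescans of already-saturated keys disappear.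
import Mathlib
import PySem

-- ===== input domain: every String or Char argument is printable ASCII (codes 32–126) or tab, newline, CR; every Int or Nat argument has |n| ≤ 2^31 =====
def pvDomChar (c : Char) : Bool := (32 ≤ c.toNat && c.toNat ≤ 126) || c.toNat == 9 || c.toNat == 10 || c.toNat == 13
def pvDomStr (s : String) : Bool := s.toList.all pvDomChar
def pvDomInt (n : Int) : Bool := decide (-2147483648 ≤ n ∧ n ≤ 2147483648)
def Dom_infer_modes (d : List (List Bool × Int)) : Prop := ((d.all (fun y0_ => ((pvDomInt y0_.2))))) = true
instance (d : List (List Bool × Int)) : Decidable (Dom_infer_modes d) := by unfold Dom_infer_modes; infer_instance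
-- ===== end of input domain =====

-- B replaces A's repeated full-rescan fixpoint by a single BFS worklist pass that generates
-- each popped key's missing one-flip supersets as a batch; both Pythons mutate d in place and
-- return it, and the equivalence proved here is about the returned dict (as its items list).

-- ===== PORT A =====
-- `list(d.keys())` / the key list used by `nk not in d`
def pvKeys (d : List (List Bool × Int)) : List (List Bool) := d.map Prod.fst
-- `d[k]` (exact when k is a key of d, which holds at every use site; first = only match)
def pvGet (d : List (List Bool × Int)) (k : List Bool) : Int :=
  ((d.find? (fun p => decide (p.1 = k))).map Prod.snd).getD 0
-- `k[:i] + (True,) + k[i+1:]`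
def pvFlip (k : List Bool) (i : Int) : List Bool :=
  PySem.List.slice k none (some i) ++ [true] ++ PySem.List.slice k (some (i + 1)) none

-- termination bound for the while-loops (a fuel artifact, not part of either algorithm):
-- pvPot c = 1 + c·pvPot (c-1) dominates the number of agenda entries a key with c free
-- positions can ever generate; any sufficient fuel gives the loop's exact semantics
def pvPot : Nat → Nat
  | 0 => 1
  | c + 1 => 1 + (c + 1) * pvPot c
def pvPhi (q : List (List Bool)) : Nat := (q.map (fun k => pvPot (k.count false))).sum

-- inner `for i, v in enumerate(k): if v is False: …` body of A, threading (d, done)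
def pvBodyA (k : List Bool) (st : List (List Bool × Int) × Bool) (iv : Int × Bool) :
    List (List Bool × Int) × Bool :=
  if iv.2 = false then
    let nk := pvFlip k iv.1
    if nk ∈ pvKeys st.1 then st else (st.1 ++ [(nk, pvGet st.1 k)], false)
  else st

-- one `for k in list(d.keys())` pass of A, with the done flag (set True at the pass's start)
def pvPassA (d : List (List Bool × Int)) : List (List Bool × Int) × Bool :=
  (pvKeys d).foldl (fun st k => (PySem.List.enumerate k 0).foldl (pvBodyA k) st) (d, true)

-- `while not done:` as fuelled recursion
def pvLoopA : Nat → List (List Bool × Int) → List (List Bool × Int)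
  | 0, d => d
  | n + 1, d =>
    let r := pvPassA d
    if r.2 then r.1 else pvLoopA n r.1

def infer_modes (d : List (List Bool × Int)) : List (List Bool × Int) :=
  pvLoopA (1 + pvPhi (pvKeys d)) d

-- ===== PORT B =====
-- `tuple(True if j == i else k[j] for j in range(len(k)))` — both indices come from
-- range(len(k)), so Nat indexing with getD is exact
def pvChild (k : List Bool) (i : Nat) : List Bool :=
  (List.range k.length).map (fun j => if j = i then true else k.getD j false)

-- the `cand` comprehension: `[… for i in range(len(k)) if not k[i]]`
def pvCand (k : List Bool) : List (List Bool) :=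
  (List.range k.length).filterMap
    (fun i => if k.getD i false = false then some (pvChild k i) else none)

-- `v = d[k]` (exact when k is a key of d, which holds at every use site)
def pvVal (d : List (List Bool × Int)) (k : List Bool) : Int :=
  ((d.find? (fun p => decide (p.1 = k))).map Prod.snd).getD 0

-- `fresh = [nk for nk in cand if nk not in d]`
def pvFresh (d : List (List Bool × Int)) (k : List Bool) : List (List Bool) :=
  (pvCand k).filter (fun nk => !decide (nk ∈ d.map Prod.fst))

-- processing one popped key: insert the fresh batch, report it for the queue
def pvStepB (d : List (List Bool × Int)) (k : List Bool) :
    List (List Bool × Int) × List (List Bool) :=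
  (d ++ (pvFresh d k).map (fun nk => (nk, pvVal d k)), pvFresh d k)

-- `while head < len(queue):` — the state is the unread suffix queue[head:] (the read prefix
-- is never consulted again, so tracking the suffix is exact); fuelled recursion as above
def pvRunB : Nat → List (List Bool × Int) → List (List Bool) → List (List Bool × Int)
  | 0, d, _ => d
  | _ + 1, d, [] => d
  | f + 1, d, k :: q => pvRunB f (pvStepB d k).1 (q ++ (pvStepB d k).2)

def infer_modes_alt (d : List (List Bool × Int)) : List (List Bool × Int) :=
  pvRunB (d.foldl (fun a p => a + pvPot (p.1.count false)) d.length) d (d.map Prod.fst)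

-- ===== PRECONDITION & SPEC =====
def Spec_infer_modes (d : List (List Bool × Int)) (out : List (List Bool × Int)) : Prop := out = infer_modes_alt d
instance (d : List (List Bool × Int)) (out : List (List Bool × Int)) : Decidable (Spec_infer_modes d out) := by unfold Spec_infer_modes; infer_instance

-- ===== CLAIM (what is proved, stated in full; the proofs are below) =====
def Claim_equal_infer_modes : Prop := ∀ (d : List (List Bool × Int)), Dom_infer_modes d → Spec_infer_modes d (infer_modes d)

-- ===== LEMMAS AND PROOFS =====

-- proof-side left-to-right step: A's inner loop without the done flag, accumulating the
-- newly inserted keys; both ports are reduced to this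
def pvBodyB (k : List Bool) (st : List (List Bool × Int) × List (List Bool))
    (iv : Int × Bool) : List (List Bool × Int) × List (List Bool) :=
  if iv.2 = false then
    let nk := pvFlip k iv.1
    if nk ∈ pvKeys st.1 then st else (st.1 ++ [(nk, pvGet st.1 k)], st.2 ++ [nk])
  else st

def pvStepQ (d : List (List Bool × Int)) (k : List Bool) :
    List (List Bool × Int) × List (List Bool) :=
  (PySem.List.enumerate k 0).foldl (pvBodyB k) (d, [])

-- computation lemmas for the two inner bodies
theorem pvBodyB_skip (k : List Bool) (d : List (List Bool × Int)) (acc : List (List Bool))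
    (iv : Int × Bool) (h : ¬ iv.2 = false) : pvBodyB k (d, acc) iv = (d, acc) := by
  simp [pvBodyB, h]

theorem pvBodyB_mem (k : List Bool) (d : List (List Bool × Int)) (acc : List (List Bool))
    (iv : Int × Bool) (h1 : iv.2 = false) (h2 : pvFlip k iv.1 ∈ pvKeys d) :
    pvBodyB k (d, acc) iv = (d, acc) := by
  simp [pvBodyB, h1, h2]

theorem pvBodyB_ins (k : List Bool) (d : List (List Bool × Int)) (acc : List (List Bool))
    (iv : Int × Bool) (h1 : iv.2 = false) (h2 : pvFlip k iv.1 ∉ pvKeys d) :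
    pvBodyB k (d, acc) iv
      = (d ++ [(pvFlip k iv.1, pvGet d k)], acc ++ [pvFlip k iv.1]) := by
  simp [pvBodyB, h1, h2]

theorem pvBodyA_skip (k : List Bool) (d : List (List Bool × Int)) (done : Bool)
    (iv : Int × Bool) (h : ¬ iv.2 = false) : pvBodyA k (d, done) iv = (d, done) := by
  simp [pvBodyA, h]

theorem pvBodyA_mem (k : List Bool) (d : List (List Bool × Int)) (done : Bool)
    (iv : Int × Bool) (h1 : iv.2 = false) (h2 : pvFlip k iv.1 ∈ pvKeys d) :
    pvBodyA k (d, done) iv = (d, done) := by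
  simp [pvBodyA, h1, h2]

theorem pvBodyA_ins (k : List Bool) (d : List (List Bool × Int)) (done : Bool)
    (iv : Int × Bool) (h1 : iv.2 = false) (h2 : pvFlip k iv.1 ∉ pvKeys d) :
    pvBodyA k (d, done) iv = (d ++ [(pvFlip k iv.1, pvGet d k)], false) := by
  simp [pvBodyA, h1, h2]

theorem pvFoldB_acc (l : List (Int × Bool)) (k : List Bool) :
    ∀ (d : List (List Bool × Int)) (acc : List (List Bool)),
      l.foldl (pvBodyB k) (d, acc) =
        ((l.foldl (pvBodyB k) (d, [])).1, acc ++ (l.foldl (pvBodyB k) (d, [])).2) := by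
  induction l with
  | nil => intro d acc; simp
  | cons iv t ih =>
    intro d acc
    simp only [List.foldl_cons]
    by_cases h1 : iv.2 = false
    · by_cases h2 : pvFlip k iv.1 ∈ pvKeys d
      · rw [pvBodyB_mem k d acc iv h1 h2, pvBodyB_mem k d [] iv h1 h2]
        exact ih d acc
      · rw [pvBodyB_ins k d acc iv h1 h2, pvBodyB_ins k d [] iv h1 h2]
        rw [ih _ (acc ++ [pvFlip k iv.1]), ih _ ([] ++ [pvFlip k iv.1])]
        simp
    · rw [pvBodyB_skip k d acc iv h1, pvBodyB_skip k d [] iv h1]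
      exact ih d acc

theorem pvFoldAB (l : List (Int × Bool)) (k : List Bool) :
    ∀ (d : List (List Bool × Int)) (done : Bool),
      l.foldl (pvBodyA k) (d, done)
        = ((l.foldl (pvBodyB k) (d, [])).1,
            done && (l.foldl (pvBodyB k) (d, [])).2.isEmpty) := by
  induction l with
  | nil => intro d done; simp
  | cons iv t ih =>
    intro d done
    simp only [List.foldl_cons]
    by_cases h1 : iv.2 = false
    · by_cases h2 : pvFlip k iv.1 ∈ pvKeys d
      · rw [pvBodyA_mem k d done iv h1 h2, pvBodyB_mem k d [] iv h1 h2]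
        exact ih d done
      · rw [pvBodyA_ins k d done iv h1 h2, pvBodyB_ins k d [] iv h1 h2]
        rw [ih _ false]
        rw [pvFoldB_acc t k (d ++ [(pvFlip k iv.1, pvGet d k)]) ([] ++ [pvFlip k iv.1])]
        simp
    · rw [pvBodyA_skip k d done iv h1, pvBodyB_skip k d [] iv h1]
      exact ih d done

theorem pvEnumAB (k : List Bool) (d : List (List Bool × Int)) (done : Bool) :
    (PySem.List.enumerate k 0).foldl (pvBodyA k) (d, done)
      = ((pvStepQ d k).1, done && (pvStepQ d k).2.isEmpty) := by
  rw [pvFoldAB]; rfl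

theorem pvKeys_append (d e : List (List Bool × Int)) :
    pvKeys (d ++ e) = pvKeys d ++ pvKeys e := by simp [pvKeys]

-- ---- the bridge: B's batch step computes the left-to-right step ----

theorem pvFlip_nat (k : List Bool) (j : Nat) :
    pvFlip k (j : Int) = k.take j ++ true :: k.drop (j + 1) := by
  have h1 : ((j : Int) + 1) = ((j + 1 : Nat) : Int) := by push_cast; ring
  rw [pvFlip, PySem.List.slice_to_natCast, h1, PySem.List.slice_from_natCast]
  simp

theorem pvChild_take (k : List Bool) (j : Nat) (hj : j < k.length) :
    pvChild k j = k.take j ++ true :: k.drop (j + 1) := by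
  apply List.ext_getElem
  · simp [pvChild]; omega
  · intro m hm1 hm2
    have hmk : m < k.length := by simpa [pvChild] using hm1
    have hjt : (k.take j).length = j := by simp; omega
    simp only [pvChild, List.getElem_map, List.getElem_range]
    rcases lt_trichotomy m j with h | h | h
    · rw [List.getElem_append_left (by omega)]
      rw [List.getElem_take]
      rw [List.getD_eq_getElem _ _ hmk]
      simp [Nat.ne_of_lt h]
    · subst h
      rw [List.getElem_append_right (by omega)]
      simp [hjt]
    · rw [List.getElem_append_right (by omega)]
      rw [List.getD_eq_getElem _ _ hmk]
      simp only [hjt, List.getElem_cons]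
      rw [dif_neg (by omega : ¬ m - j = 0), List.getElem_drop]
      simp only [if_neg (Nat.ne_of_gt h)]
      congr 1
      omega

theorem pvFlip_child (k : List Bool) (j : Nat) (hj : j < k.length) :
    pvFlip k (j : Int) = pvChild k j := by
  rw [pvFlip_nat, pvChild_take k j hj]

theorem pvChild_ne_self (k : List Bool) (j : Nat) (hj : j < k.length)
    (hf : k.getD j false = false) : pvChild k j ≠ k := by
  intro he
  have hlen : j < (pvChild k j).length := by simpa [pvChild] using hj
  have h := congrArg (fun l : List Bool => l.getD j false) he
  simp only at h
  rw [List.getD_eq_getElem _ _ hlen, List.getD_eq_getElem _ _ hj] at h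
  simp only [pvChild, List.getElem_map, List.getElem_range] at h
  rw [List.getD_eq_getElem _ _ hj] at hf
  rw [hf] at h
  exact Bool.noConfusion h

theorem pvChild_ne_child (k : List Bool) (i n : Nat) (hi : i < k.length) (_hn : n < k.length)
    (hne : i ≠ n) (hf : k.getD i false = false) : pvChild k i ≠ pvChild k n := by
  intro he
  have hli : i < (pvChild k i).length := by simpa [pvChild] using hi
  have hln : i < (pvChild k n).length := by simpa [pvChild] using hi
  have h := congrArg (fun l : List Bool => l.getD i false) he
  simp only at h
  rw [List.getD_eq_getElem _ _ hli, List.getD_eq_getElem _ _ hln] at h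
  simp only [pvChild, List.getElem_map, List.getElem_range] at h
  rw [if_neg hne] at h
  rw [hf] at h
  exact Bool.noConfusion h

theorem pvGet_append_of_ne (d P : List (List Bool × Int)) (k : List Bool)
    (h : ∀ p ∈ P, p.1 ≠ k) : pvGet (d ++ P) k = pvGet d k := by
  unfold pvGet
  rw [List.find?_append]
  have hP : P.find? (fun p => decide (p.1 = k)) = none := by
    rw [List.find?_eq_none]
    intro p hp
    simpa using h p hp
  cases hd : d.find? (fun p => decide (p.1 = k)) <;> simp [hP]

-- the fresh batch restricted to the first n indices
def pvFreshN (d : List (List Bool × Int)) (k : List Bool) (n : Nat) : List (List Bool) :=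
  (((List.range n).filterMap
      (fun i => if k.getD i false = false then some (pvChild k i) else none)).filter
    (fun nk => !decide (nk ∈ d.map Prod.fst)))

theorem pvFreshN_mem (d : List (List Bool × Int)) (k : List Bool) (n : Nat) (x : List Bool)
    (hx : x ∈ pvFreshN d k n) :
    ∃ i, i < n ∧ k.getD i false = false ∧ x = pvChild k i ∧ x ∉ d.map Prod.fst := by
  unfold pvFreshN at hx
  rw [List.mem_filter] at hx
  obtain ⟨hx1, hx2⟩ := hx
  rw [List.mem_filterMap] at hx1
  obtain ⟨i, hi, hxi⟩ := hx1
  rw [List.mem_range] at hi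
  by_cases hf : k.getD i false = false
  · rw [if_pos hf] at hxi
    refine ⟨i, hi, hf, (Option.some_inj.mp hxi).symm, ?_⟩
    simpa using hx2
  · rw [if_neg hf] at hxi
    exact absurd hxi (by simp)

theorem pvFoldQ (k : List Bool) (n : Nat) (hn : n ≤ k.length) :
    ∀ d : List (List Bool × Int),
      (List.range n).foldl
          (fun st (j : Nat) => pvBodyB k st ((j : Int), PySem.List.pyGetD k (j : Int) false)) (d, [])
        = (d ++ (pvFreshN d k n).map (fun nk => (nk, pvGet d k)), pvFreshN d k n) := by
  induction n with
  | zero => intro d; simp [pvFreshN]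
  | succ n ih =>
    intro d
    have hn' : n < k.length := by omega
    rw [List.range_succ, List.foldl_append, ih (by omega) d]
    have hF : pvFreshN d k (n + 1)
        = pvFreshN d k n
          ++ (if k.getD n false = false ∧ pvChild k n ∉ d.map Prod.fst
              then [pvChild k n] else []) := by
      unfold pvFreshN
      rw [List.range_succ, List.filterMap_append, List.filter_append]
      congr 1
      simp only [List.filterMap_cons, List.filterMap_nil]
      by_cases hf : k.getD n false = false
      · rw [if_pos hf]
        by_cases hm : pvChild k n ∈ d.map Prod.fst
        · rw [if_neg (fun hc => hc.2 hm)]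
          simp [hm]
        · rw [if_pos ⟨hf, hm⟩]
          simp [hm]
      · rw [if_neg hf, if_neg (fun hc => hf hc.1)]
        simp
    have hget : PySem.List.pyGetD k (n : Int) false = k.getD n false := by
      rw [PySem.List.pyGetD_eq_getElem k false (by positivity) (by exact_mod_cast hn')]
      rw [List.getD_eq_getElem _ _ (by simpa using hn')]
      simp
    simp only [List.foldl_cons, List.foldl_nil, hget]
    by_cases hf : k.getD n false = false
    · have hf2 : k[n]?.getD false = false := by
        rw [← List.getD_eq_getElem?_getD]; exact hf
 -- the flip at index n
      have hflip : pvFlip k (n : Int) = pvChild k n := pvFlip_child k n hn'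
      have hne_prev : pvChild k n ∉ pvFreshN d k n := by
        intro hmem
        obtain ⟨i, hi, hfi, hx, _⟩ := pvFreshN_mem d k n _ hmem
        exact pvChild_ne_child k i n (by omega) hn' (by omega) hfi hx.symm
      have hmapfst : ∀ F : List (List Bool),
          (F.map (fun nk => (nk, pvGet d k))).map Prod.fst = F := by
        intro F
        induction F with
        | nil => rfl
        | cons a t ih2 => simp only [List.map_cons, ih2]
      have hkeys : pvKeys (d ++ (pvFreshN d k n).map (fun nk => (nk, pvGet d k)))
          = d.map Prod.fst ++ pvFreshN d k n := by
        rw [pvKeys_append]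
        show d.map Prod.fst
            ++ ((pvFreshN d k n).map (fun nk => (nk, pvGet d k))).map Prod.fst = _
        rw [hmapfst]
      by_cases hm : pvChild k n ∈ d.map Prod.fst
      · rw [pvBodyB_mem k _ _ _ hf (by rw [hflip, hkeys]; exact List.mem_append_left _ hm)]
        rw [hF]
        simp [hf2, hm]
      · rw [pvBodyB_ins k _ _ _ hf (by
          rw [hflip, hkeys]
          intro hc
          rcases List.mem_append.mp hc with hc | hc
          · exact hm hc
          · exact hne_prev hc)]
        have hgets : pvGet (d ++ (pvFreshN d k n).map (fun nk => (nk, pvGet d k))) k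
            = pvGet d k := by
          apply pvGet_append_of_ne
          intro p hp
          rw [List.mem_map] at hp
          obtain ⟨nk, hnk, rfl⟩ := hp
          obtain ⟨i, hi, hfi, hx, _⟩ := pvFreshN_mem d k n nk hnk
          simpa [hx] using pvChild_ne_self k i (by omega) hfi
        rw [hgets, hflip, hF]
        simp [hf2, hm]
    · have hf2 : ¬ k[n]?.getD false = false := by
        rw [← List.getD_eq_getElem?_getD]; exact hf
      have hf' : ¬ ((n : Int), k.getD n false).2 = false := by simpa using hf
      rw [pvBodyB_skip k _ _ _ hf']
      rw [hF]
      simp [hf2]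

theorem pvStepB_eq (d : List (List Bool × Int)) (k : List Bool) :
    pvStepB d k = pvStepQ d k := by
  unfold pvStepQ
  rw [PySem.List.enumerate_eq_map_pyRange k false, PySem.List.pyRange_one, List.foldl_map,
    List.foldl_map]
  simp only [zero_add, PySem.List.len_eq, Int.sub_zero, Int.toNat_natCast]
  rw [pvFoldQ k k.length le_rfl d]
  unfold pvStepB pvFresh pvCand pvFreshN pvVal pvGet
  rfl

-- ---- saturation / potential argument over the proof-side step ----

-- B's pass over a whole list of keys, accumulating the agenda
def pvMulti (d : List (List Bool × Int)) (q : List (List Bool)) :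
    List (List Bool × Int) × List (List Bool) :=
  q.foldl (fun st k => ((pvStepQ st.1 k).1, st.2 ++ (pvStepQ st.1 k).2)) (d, [])

-- k is saturated in d: every child of k is already a key of d
def pvSat (d : List (List Bool × Int)) (k : List Bool) : Prop :=
  ∀ iv ∈ PySem.List.enumerate k 0, iv.2 = false → pvFlip k iv.1 ∈ pvKeys d

theorem pvFoldB_shape (l : List (Int × Bool)) (k : List Bool) :
    ∀ d : List (List Bool × Int),
      ∃ ps, l.foldl (pvBodyB k) (d, []) = (d ++ ps, ps.map Prod.fst) := by
  induction l with
  | nil => intro d; exact ⟨[], by simp⟩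
  | cons iv t ih =>
    intro d
    simp only [List.foldl_cons]
    by_cases h1 : iv.2 = false
    · by_cases h2 : pvFlip k iv.1 ∈ pvKeys d
      · rw [pvBodyB_mem k d [] iv h1 h2]; exact ih d
      · obtain ⟨ps, hps⟩ := ih (d ++ [(pvFlip k iv.1, pvGet d k)])
        refine ⟨(pvFlip k iv.1, pvGet d k) :: ps, ?_⟩
        rw [pvBodyB_ins k d [] iv h1 h2]
        rw [pvFoldB_acc t k (d ++ [(pvFlip k iv.1, pvGet d k)]) ([] ++ [pvFlip k iv.1]), hps]
        simp
    · rw [pvBodyB_skip k d [] iv h1]; exact ih d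

theorem pvStepQ_shape (d : List (List Bool × Int)) (k : List Bool) :
    ∃ ps, pvStepQ d k = (d ++ ps, ps.map Prod.fst) := pvFoldB_shape _ k d

theorem pvFoldB_mem (l : List (Int × Bool)) (k : List Bool) (d : List (List Bool × Int))
    (x : List Bool) (hx : x ∈ pvKeys d) :
    x ∈ pvKeys (l.foldl (pvBodyB k) (d, [])).1 := by
  obtain ⟨ps, hps⟩ := pvFoldB_shape l k d
  rw [hps]
  simp only [pvKeys_append, List.mem_append]
  exact Or.inl hx

theorem pvFoldB_sat (l : List (Int × Bool)) (k : List Bool) :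
    ∀ d : List (List Bool × Int), ∀ iv ∈ l, iv.2 = false →
      pvFlip k iv.1 ∈ pvKeys (l.foldl (pvBodyB k) (d, [])).1 := by
  induction l with
  | nil => simp
  | cons jv t ih =>
    intro d iv hiv hf
    simp only [List.foldl_cons]
    rcases List.mem_cons.mp hiv with rfl | htail
    · by_cases h2 : pvFlip k iv.1 ∈ pvKeys d
      · rw [pvBodyB_mem k d [] iv hf h2]
        exact pvFoldB_mem t k d _ h2
      · rw [pvBodyB_ins k d [] iv hf h2]
        rw [pvFoldB_acc t k (d ++ [(pvFlip k iv.1, pvGet d k)]) ([] ++ [pvFlip k iv.1])]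
        exact pvFoldB_mem t k _ _ (by simp [pvKeys])
    · rw [show pvBodyB k (d, []) jv
        = ((pvBodyB k (d, []) jv).1, (pvBodyB k (d, []) jv).2) from rfl]
      rw [pvFoldB_acc t k (pvBodyB k (d, []) jv).1 (pvBodyB k (d, []) jv).2]
      exact ih _ iv htail hf

theorem pvSat_mono (d e : List (List Bool × Int)) (k : List Bool) (h : pvSat d k) :
    pvSat (d ++ e) k := by
  intro iv hiv hf
  have := h iv hiv hf
  simp only [pvKeys_append, List.mem_append]
  exact Or.inl this

theorem pvStepQ_sat_self (d : List (List Bool × Int)) (k : List Bool) :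
    pvSat (pvStepQ d k).1 k :=
  fun iv hiv hf => pvFoldB_sat _ k d iv hiv hf

theorem pvFoldB_noop (l : List (Int × Bool)) (k : List Bool) :
    ∀ d : List (List Bool × Int),
      (∀ iv ∈ l, iv.2 = false → pvFlip k iv.1 ∈ pvKeys d) →
      l.foldl (pvBodyB k) (d, []) = (d, []) := by
  induction l with
  | nil => intro d _; rfl
  | cons jv t ih =>
    intro d h
    simp only [List.foldl_cons]
    by_cases h1 : jv.2 = false
    · rw [pvBodyB_mem k d [] jv h1 (h jv List.mem_cons_self h1)]
      exact ih d (fun iv hiv hf => h iv (List.mem_cons_of_mem _ hiv) hf)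
    · rw [pvBodyB_skip k d [] jv h1]
      exact ih d (fun iv hiv hf => h iv (List.mem_cons_of_mem _ hiv) hf)

theorem pvStepQ_noop (d : List (List Bool × Int)) (k : List Bool) (h : pvSat d k) :
    pvStepQ d k = (d, []) := pvFoldB_noop _ k d h

theorem pvFoldB_news (l : List (Int × Bool)) (k : List Bool) :
    ∀ d : List (List Bool × Int), ∀ nk ∈ (l.foldl (pvBodyB k) (d, [])).2,
      ∃ iv, iv ∈ l ∧ iv.2 = false ∧ nk = pvFlip k iv.1 := by
  induction l with
  | nil => simp
  | cons jv t ih =>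
    intro d nk h
    simp only [List.foldl_cons] at h
    by_cases h1 : jv.2 = false
    · by_cases h2 : pvFlip k jv.1 ∈ pvKeys d
      · rw [pvBodyB_mem k d [] jv h1 h2] at h
        obtain ⟨iv, hiv, hf, he⟩ := ih d nk h
        exact ⟨iv, List.mem_cons_of_mem _ hiv, hf, he⟩
      · rw [pvBodyB_ins k d [] jv h1 h2,
          pvFoldB_acc t k (d ++ [(pvFlip k jv.1, pvGet d k)]) ([] ++ [pvFlip k jv.1])] at h
        simp only [List.nil_append, List.singleton_append, List.mem_cons] at h
        rcases h with rfl | h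
        · exact ⟨jv, List.mem_cons_self, h1, rfl⟩
        · obtain ⟨iv, hiv, hf, he⟩ := ih _ nk h
          exact ⟨iv, List.mem_cons_of_mem _ hiv, hf, he⟩
    · rw [pvBodyB_skip k d [] jv h1] at h
      obtain ⟨iv, hiv, hf, he⟩ := ih d nk h
      exact ⟨iv, List.mem_cons_of_mem _ hiv, hf, he⟩

theorem pvFoldB_news_len (l : List (Int × Bool)) (k : List Bool) :
    ∀ d : List (List Bool × Int),
      ((l.foldl (pvBodyB k) (d, [])).2).length ≤ l.countP (fun iv => iv.2 == false) := by
  induction l with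
  | nil => simp
  | cons jv t ih =>
    intro d
    simp only [List.foldl_cons, List.countP_cons]
    by_cases h1 : jv.2 = false
    · have hp : ((fun iv : Int × Bool => iv.2 == false) jv) = true := by simp [h1]
      by_cases h2 : pvFlip k jv.1 ∈ pvKeys d
      · rw [pvBodyB_mem k d [] jv h1 h2]
        have := ih d
        simp only [hp, if_true]
        omega
      · rw [pvBodyB_ins k d [] jv h1 h2,
          pvFoldB_acc t k (d ++ [(pvFlip k jv.1, pvGet d k)]) ([] ++ [pvFlip k jv.1])]
        have := ih (d ++ [(pvFlip k jv.1, pvGet d k)])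
        simp only [hp, if_true, List.nil_append, List.singleton_append, List.length_cons]
        omega
    · have hp : ((fun iv : Int × Bool => iv.2 == false) jv) = false := by
        simpa using h1
      rw [pvBodyB_skip k d [] jv h1]
      have := ih d
      simp only [hp]
      omega

theorem pvEnumMem (k : List Bool) :
    ∀ (s : Int), ∀ iv ∈ PySem.List.enumerate k s,
      ∃ j : Nat, iv.1 = s + j ∧ k[j]? = some iv.2 := by
  induction k with
  | nil => intro s iv h; simp [PySem.List.enumerate] at h
  | cons x t ih =>
    intro s iv h
    rw [PySem.List.enumerate_cons] at h
    rcases List.mem_cons.mp h with rfl | h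
    · exact ⟨0, by simp⟩
    · obtain ⟨j, hj1, hj2⟩ := ih (s + 1) iv h
      refine ⟨j + 1, ?_, by simpa using hj2⟩
      push_cast
      omega

theorem pvFlip_count (k : List Bool) (j : Nat) (h : k[j]? = some false) :
    (pvFlip k (j : Int)).count false + 1 = k.count false := by
  have hj : j < k.length := by
    by_contra hc
    rw [List.getElem?_eq_none (by omega)] at h
    simp at h
  have hget : k[j] = false := by
    rw [List.getElem?_eq_getElem hj] at h
    simpa using h
  rw [pvFlip_nat]
  conv_rhs => rw [← List.take_append_drop j k, ← List.getElem_cons_drop hj]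
  simp [List.count_append, hget]
  omega

theorem pvPot_pos (c : Nat) : 1 ≤ pvPot c := by cases c <;> simp [pvPot]

theorem pvPhi_cons (k : List Bool) (t : List (List Bool)) :
    pvPhi (k :: t) = pvPot (k.count false) + pvPhi t := by simp [pvPhi]

theorem pvPhi_append (a b : List (List Bool)) : pvPhi (a ++ b) = pvPhi a + pvPhi b := by
  simp [pvPhi]

theorem pvPhi_ge_len (q : List (List Bool)) : q.length ≤ pvPhi q := by
  induction q with
  | nil => simp [pvPhi]
  | cons k t ih =>
    rw [pvPhi_cons]
    have := pvPot_pos (k.count false)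
    simp only [List.length_cons]
    omega

theorem pvCount_enum (k : List Bool) :
    (PySem.List.enumerate k 0).countP (fun iv => iv.2 == false) = k.count false := by
  have h := PySem.List.map_snd_enumerate k (0 : Int)
  calc (PySem.List.enumerate k 0).countP (fun iv => iv.2 == false)
      = ((PySem.List.enumerate k 0).map Prod.snd).countP (fun v => v == false) := by
        rw [List.countP_map]; rfl
    _ = k.count false := by rw [h]; rfl

theorem pvStepQ_phi (d : List (List Bool × Int)) (k : List Bool) :
    pvPhi (pvStepQ d k).2 + 1 ≤ pvPot (k.count false) := by
  by_cases hne : (pvStepQ d k).2 = []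
  · rw [hne]
    have := pvPot_pos (k.count false)
    simp only [pvPhi, List.map_nil, List.sum_nil]
    omega
  · -- some child was produced: k has at least one free position
    have hchild : ∀ nk ∈ (pvStepQ d k).2, nk.count false + 1 = k.count false := by
      intro nk hnk
      obtain ⟨iv, hiv, hf, rfl⟩ := pvFoldB_news _ k d nk hnk
      obtain ⟨j, hj1, hj2⟩ := pvEnumMem k 0 iv hiv
      rw [hf] at hj2
      rw [hj1, zero_add]
      exact pvFlip_count k j hj2
    obtain ⟨nk0, hnk0⟩ := List.exists_mem_of_ne_nil _ hne
    have hc : 1 ≤ k.count false := by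
      have := hchild nk0 hnk0; omega
    obtain ⟨c, hcc⟩ : ∃ c, k.count false = c + 1 := ⟨k.count false - 1, by omega⟩
    have hlen : (pvStepQ d k).2.length ≤ c + 1 := by
      have h := pvFoldB_news_len (PySem.List.enumerate k 0) k d
      rw [pvCount_enum] at h
      have h' : (pvStepQ d k).2.length ≤ k.count false := h
      omega
    have hsum : pvPhi (pvStepQ d k).2 ≤ (pvStepQ d k).2.length * pvPot c := by
      have hb : ∀ x ∈ ((pvStepQ d k).2.map (fun nk => pvPot (nk.count false))),
          x ≤ pvPot c := by
        intro x hx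
        obtain ⟨nk, hnk, rfl⟩ := List.mem_map.mp hx
        have h1 := hchild nk hnk
        have h2 : nk.count false = c := by omega
        rw [h2]
      have := List.sum_le_card_nsmul _ (pvPot c) hb
      simpa [pvPhi, smul_eq_mul] using this
    have hmul : (pvStepQ d k).2.length * pvPot c ≤ (c + 1) * pvPot c :=
      Nat.mul_le_mul_right _ hlen
    rw [hcc]
    simp only [pvPot]
    omega

theorem pvMulti_acc (q : List (List Bool)) :
    ∀ (d : List (List Bool × Int)) (acc : List (List Bool)),
      q.foldl (fun st k => ((pvStepQ st.1 k).1, st.2 ++ (pvStepQ st.1 k).2)) (d, acc)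
        = ((pvMulti d q).1, acc ++ (pvMulti d q).2) := by
  induction q with
  | nil => intro d acc; simp [pvMulti]
  | cons k t ih =>
    intro d acc
    simp only [pvMulti, List.foldl_cons]
    rw [ih _ (acc ++ (pvStepQ d k).2), ih _ ([] ++ (pvStepQ d k).2)]
    simp

theorem pvMulti_cons (d : List (List Bool × Int)) (k : List Bool) (t : List (List Bool)) :
    pvMulti d (k :: t)
      = ((pvMulti (pvStepQ d k).1 t).1,
          (pvStepQ d k).2 ++ (pvMulti (pvStepQ d k).1 t).2) := by
  simp only [pvMulti, List.foldl_cons]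
  rw [pvMulti_acc]
  simp [pvMulti]

theorem pvMulti_shape (q : List (List Bool)) :
    ∀ d : List (List Bool × Int), ∃ ps, pvMulti d q = (d ++ ps, ps.map Prod.fst) := by
  induction q with
  | nil => intro d; exact ⟨[], by simp [pvMulti]⟩
  | cons k t ih =>
    intro d
    obtain ⟨ps1, hps1⟩ := pvStepQ_shape d k
    obtain ⟨ps2, hps2⟩ := ih (pvStepQ d k).1
    refine ⟨ps1 ++ ps2, ?_⟩
    rw [pvMulti_cons, hps2, hps1]
    simp

theorem pvMulti_keys (d : List (List Bool × Int)) (q : List (List Bool)) :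
    pvKeys (pvMulti d q).1 = pvKeys d ++ (pvMulti d q).2 := by
  obtain ⟨ps, hps⟩ := pvMulti_shape q d
  rw [hps, pvKeys_append]
  rfl

theorem pvMulti_sat_pres (q : List (List Bool)) (d : List (List Bool × Int)) (k : List Bool)
    (h : pvSat d k) : pvSat (pvMulti d q).1 k := by
  obtain ⟨ps, hps⟩ := pvMulti_shape q d
  rw [hps]
  exact pvSat_mono d ps k h

theorem pvMulti_sat (q : List (List Bool)) :
    ∀ d : List (List Bool × Int), ∀ k ∈ q, pvSat (pvMulti d q).1 k := by
  induction q with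
  | nil => simp
  | cons k0 t ih =>
    intro d k hk
    rw [pvMulti_cons]
    rcases List.mem_cons.mp hk with rfl | hk
    · exact pvMulti_sat_pres t _ k (pvStepQ_sat_self d k)
    · exact ih _ k hk

theorem pvMulti_noop (p : List (List Bool)) :
    ∀ (d : List (List Bool × Int)) (q : List (List Bool)),
      (∀ k ∈ p, pvSat d k) → pvMulti d (p ++ q) = pvMulti d q := by
  induction p with
  | nil => intro d q _; rfl
  | cons k0 t ih =>
    intro d q h
    rw [List.cons_append, pvMulti_cons, pvStepQ_noop d k0 (h k0 List.mem_cons_self)]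
    simp only [List.nil_append]
    exact ih d q (fun k hk => h k (List.mem_cons_of_mem _ hk))

theorem pvMulti_phi (q : List (List Bool)) :
    ∀ d : List (List Bool × Int), pvPhi (pvMulti d q).2 + q.length ≤ pvPhi q := by
  induction q with
  | nil => intro d; simp [pvMulti, pvPhi]
  | cons k t ih =>
    intro d
    rw [pvMulti_cons]
    simp only [pvPhi_append, List.length_cons, pvPhi_cons]
    have h1 := pvStepQ_phi d k
    have h2 := ih (pvStepQ d k).1
    omega

theorem pvPassA_eq (ks : List (List Bool)) :
    ∀ (d : List (List Bool × Int)) (done : Bool),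
      ks.foldl (fun st k => (PySem.List.enumerate k 0).foldl (pvBodyA k) st) (d, done)
        = ((pvMulti d ks).1, done && (pvMulti d ks).2.isEmpty) := by
  induction ks with
  | nil => intro d done; simp [pvMulti]
  | cons k t ih =>
    intro d done
    simp only [List.foldl_cons]
    rw [pvEnumAB, ih, pvMulti_cons]
    cases hql : (pvStepQ d k).2 <;> cases hq2 : (pvMulti (pvStepQ d k).1 t).2 <;>
      simp

theorem pvRunB_nil (f : Nat) (d : List (List Bool × Int)) : pvRunB f d [] = d := by
  cases f <;> rfl

theorem pvRunB_eq (q : List (List Bool)) :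
    ∀ (r : List (List Bool)) (d : List (List Bool × Int)) (f : Nat), q.length ≤ f →
      pvRunB f d (q ++ r) = pvRunB (f - q.length) (pvMulti d q).1 (r ++ (pvMulti d q).2) := by
  induction q with
  | nil => intro r d f _; simp [pvMulti]
  | cons k t ih =>
    intro r d f hf
    have hf1 : 1 ≤ f := le_trans (by simp) hf
    obtain ⟨f', rfl⟩ : ∃ f', f = f' + 1 := ⟨f - 1, by omega⟩
    have hf' : t.length ≤ f' := by
      simp only [List.length_cons] at hf
      omega
    simp only [List.cons_append, pvRunB, pvStepB_eq]
    rw [List.append_assoc, ih (r ++ (pvStepQ d k).2) (pvStepQ d k).1 f' hf']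
    rw [pvMulti_cons]
    simp only [List.length_cons, Nat.succ_sub_succ]
    rw [List.append_assoc]

theorem pvSim : ∀ n : Nat, ∀ (d : List (List Bool × Int)) (p q : List (List Bool))
    (fA fB : Nat), pvPhi q ≤ n → pvKeys d = p ++ q → (∀ k ∈ p, pvSat d k) →
    1 + pvPhi q ≤ fA → pvPhi q ≤ fB → pvLoopA fA d = pvRunB fB d q := by
  intro n
  induction n using Nat.strong_induction_on with
  | _ n ih =>
    intro d p q fA fB hn hkeys hp hfA hfB
    obtain ⟨fA', rfl⟩ : ∃ x, fA = x + 1 := ⟨fA - 1, by omega⟩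
    have hpass : pvPassA d = ((pvMulti d q).1, (pvMulti d q).2.isEmpty) := by
      unfold pvPassA
      rw [pvPassA_eq, hkeys, pvMulti_noop p d q hp]
      simp
    have hlen : q.length ≤ fB := le_trans (pvPhi_ge_len q) hfB
    have hrun := pvRunB_eq q [] d fB hlen
    rw [List.append_nil] at hrun
    by_cases hnews : (pvMulti d q).2 = []
    · obtain ⟨ps, hps⟩ := pvMulti_shape q d
      have hps0 : ps = [] := by
        have h2 : ps.map Prod.fst = [] := by
          have hsnd := congrArg Prod.snd hps
          simp only at hsnd
          rw [← hsnd]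
          exact hnews
        simpa using h2
      have h1 : (pvMulti d q).1 = d := by rw [hps, hps0]; simp
      simp only [pvLoopA, hpass, hnews, List.isEmpty_nil, if_true]
      rw [h1, hrun, h1, hnews]
      exact (pvRunB_nil _ d).symm
    · have hfalse : (pvMulti d q).2.isEmpty = false := by
        cases h : (pvMulti d q).2 with
        | nil => exact absurd h hnews
        | cons a s => rfl
      simp only [pvLoopA, hpass, hfalse, Bool.false_eq_true, if_false]
      have hq : q ≠ [] := by
        rintro rfl
        simp [pvMulti] at hnews
      have hql : 1 ≤ q.length := by
        cases q
        · exact absurd rfl hq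
        · simp
      have hphi := pvMulti_phi q d
      rw [hrun]
      simp only [List.nil_append]
      refine ih (pvPhi (pvMulti d q).2) (by omega) (pvMulti d q).1 (p ++ q)
        (pvMulti d q).2 fA' (fB - q.length) le_rfl ?_ ?_ (by omega) (by omega)
      · rw [pvMulti_keys, hkeys, List.append_assoc]
      · intro k hk
        rcases List.mem_append.mp hk with hk | hk
        · exact pvMulti_sat_pres q d k (hp k hk)
        · exact pvMulti_sat q d k hk

-- B's fuel expression equals d.length + pvPhi (pvKeys d)
theorem pvFuelB (d : List (List Bool × Int)) :
    ∀ c : Nat, d.foldl (fun a p => a + pvPot (p.1.count false)) c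
      = c + pvPhi (d.map Prod.fst) := by
  induction d with
  | nil => intro c; simp [pvPhi]
  | cons p t ih =>
    intro c
    simp only [List.foldl_cons, List.map_cons, pvPhi_cons, ih]
    omega

-- ===== VERDICT (by name: the statement is the Claim_ definition above) =====
theorem infer_modes_spec : Claim_equal_infer_modes := by
  unfold Claim_equal_infer_modes
  intro d _
  unfold Spec_infer_modes infer_modes infer_modes_alt
  rw [pvFuelB d d.length]
  exact pvSim (pvPhi (pvKeys d)) d [] (pvKeys d) (1 + pvPhi (pvKeys d))
    (d.length + pvPhi (pvKeys d)) le_rfl (by simp) (by simp) le_rfl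
    (Nat.le_add_left _ _)
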